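-- pv_equiv track=rewrite | github.com/SSong-sh/capstone | app.py | find_peak_group
-- ===== SOURCE A (Python) =====
-- def find_peak_group(season_price, power_use):
--     # Create a dictionary to map price to hours
--     price_to_hours = {}
--     for hour, price in enumerate(season_price):
--         if price not in price_to_hours:
--             price_to_hours[price] = []
--         price_to_hours[price].append(hour)
--
--     # Identify the group with the highest power use
--     max_power = -float('inf')
--     peak_group = None
--     for price, hours in price_to_hours.items():
--         total_power = sum([power_use[hour] for hour in hours])
--         if total_power > max_power:
--             max_power = total_power
--             peak_group = hours
--
--     return peak_group
-- ===== SOURCE B (Python) =====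
-- def find_peak_group(season_price, power_use):
--     # Accumulate total power per price in one pass (scalar totals, no per-group lists)
--     totals = {}
--     for hour, price in enumerate(season_price):
--         totals[price] = totals.get(price, 0) + power_use[hour]
--     # Pick the first price with the strictly greatest total (insertion order breaks ties)
--     best = None  # (price, total)
--     for price, total in totals.items():
--         if best is None or total > best[1]:
--             best = (price, total)
--     if best is None:
--         return None
--     # Reconstruct the winner's hours in one final pass
--     return [hour for hour, price in enumerate(season_price) if price == best[0]]
-- ===== Notes on version B (the rewrite author's own statement) =====
-- stated objective: alternative
-- what changed: B keeps a single scalar running total per price (dict of sums built in one enumerate pass) instead of per-price hour lists, picks the winning price with a strict-> scan, and rebuilds the winner's hours in one final pass; A groups all hours into lists first and re-sums each group during the scan.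
import Mathlib
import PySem

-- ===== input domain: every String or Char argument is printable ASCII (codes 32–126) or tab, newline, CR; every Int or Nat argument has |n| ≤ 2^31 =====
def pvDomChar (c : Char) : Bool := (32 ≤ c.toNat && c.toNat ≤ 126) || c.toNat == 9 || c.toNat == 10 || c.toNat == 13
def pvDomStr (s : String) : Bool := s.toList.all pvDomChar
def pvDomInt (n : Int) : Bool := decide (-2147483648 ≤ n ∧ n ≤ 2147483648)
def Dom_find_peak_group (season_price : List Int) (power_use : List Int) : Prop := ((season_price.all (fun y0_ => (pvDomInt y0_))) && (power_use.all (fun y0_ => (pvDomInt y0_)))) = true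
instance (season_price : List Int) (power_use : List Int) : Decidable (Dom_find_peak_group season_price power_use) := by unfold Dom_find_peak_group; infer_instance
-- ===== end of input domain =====

-- B keeps a scalar running total per price and reconstructs the winner's hours in a final
-- pass, instead of A's per-price hour lists re-summed during the scan; same return value.

-- ===== PORT A =====
-- A's "max_power = -float('inf')" is modelled as none in an Option Int: the first
-- comparison "total > -inf" is always true, exactly as the none branch always fires.
-- power_use[hour] is PySem.List.pyGetD; its default is never reached under Pre_.
def find_peak_group (season_price : List Int) (power_use : List Int) : Option (List Int) :=
  let pth := (PySem.List.enumerate season_price).foldl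
    (fun d hp =>
      let d1 := if d.contains hp.2 then d else d.insert hp.2 ([] : List Int)
      d1.modify hp.2 [] (fun hs => hs ++ [hp.1]))
    PySem.Dict.empty
  let st := pth.items.foldl
    (fun st pr =>
      let total := (pr.2.map (fun h => PySem.List.pyGetD power_use h 0)).sum
      match st.1 with
      | none => (some total, some pr.2)
      | some m => if m < total then (some total, some pr.2) else st)
    ((none, none) : Option Int × Option (List Int))
  st.2

-- ===== PORT B =====
def find_peak_group_alt (season_price : List Int) (power_use : List Int) : Option (List Int) :=
  let totals := (PySem.List.enumerate season_price).foldl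
    (fun d hp => d.modify hp.2 0 (fun t => t + PySem.List.pyGetD power_use hp.1 0))
    PySem.Dict.empty
  let best := totals.items.foldl
    (fun b pr =>
      match b with
      | none => some pr
      | some bb => if bb.2 < pr.2 then some pr else b)
    (none : Option (Int × Int))
  match best with
  | none => none
  | some bb =>
      some (((PySem.List.enumerate season_price).filter (fun hp => hp.2 == bb.1)).map (fun hp => hp.1))

-- ===== PRECONDITION & SPEC =====
-- Pre_: power_use covers every hour of season_price; on shorter power_use both Pythons
-- raise IndexError (A while summing a group, B while accumulating).
def Pre_find_peak_group (season_price : List Int) (power_use : List Int) : Prop :=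
  season_price.length ≤ power_use.length
instance (season_price : List Int) (power_use : List Int) : Decidable (Pre_find_peak_group season_price power_use) := by unfold Pre_find_peak_group; infer_instance
def pvWitness_find_peak_group : List Int × List Int := ([1, 2, 1], [4, 5, 6])

def Spec_find_peak_group (season_price : List Int) (power_use : List Int) (out : Option (List Int)) : Prop := out = find_peak_group_alt season_price power_use
instance (season_price : List Int) (power_use : List Int) (out : Option (List Int)) : Decidable (Spec_find_peak_group season_price power_use out) := by unfold Spec_find_peak_group; infer_instance

-- ===== CLAIM (what is proved, stated in full; the proofs are below) =====
def Claim_equal_find_peak_group : Prop := ∀ (season_price : List Int) (power_use : List Int), Dom_find_peak_group season_price power_use → Pre_find_peak_group season_price power_use → Spec_find_peak_group season_price power_use (find_peak_group season_price power_use)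

-- ===== LEMMAS AND PROOFS =====

theorem stepA_eq_modify (d : PySem.Dict Int (List Int)) (k : Int) (h : Int) :
    (let d1 := if d.contains k then d else d.insert k ([] : List Int)
     d1.modify k [] (fun hs => hs ++ [h])) = d.modify k [] (fun hs => hs ++ [h]) := by
  cases hc : d.contains k <;>
    simp [hc, PySem.Dict.modify, PySem.Dict.insert_insert_self,
      PySem.Dict.getD_of_not_contains]

theorem getD_foldl_modify_add (l : List (Int × Int)) (d : PySem.Dict Int Int)
    (g : Int × Int → Int) (c : Int) :
    (l.foldl (fun d hp => d.modify hp.2 0 (fun t => t + g hp)) d).getD c 0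
      = d.getD c 0 + ((l.filter (fun hp => hp.2 == c)).map g).sum := by
  induction l generalizing d with
  | nil => simp
  | cons hp t ih =>
      simp only [List.foldl_cons, ih, List.filter_cons]
      by_cases hk : hp.2 = c
      · simp [hk, PySem.Dict.getD_modify_self]; ring
      · simp [hk, PySem.Dict.getD_modify_of_ne, Ne.symm hk]

theorem scan_agree (hours : Int → List Int) (tot : Int → Int) (pu : List Int)
    (hsum : ∀ c, ((hours c).map (fun h => PySem.List.pyGetD pu h 0)).sum = tot c)
    (K : List Int) (stB : Option (Int × Int)) :
    ((K.map (fun k => (k, hours k))).foldl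
      (fun (st : Option Int × Option (List Int)) (pr : Int × List Int) =>
        let total := (pr.2.map (fun h => PySem.List.pyGetD pu h 0)).sum
        match st.1 with
        | none => (some total, some pr.2)
        | some m => if m < total then (some total, some pr.2) else st)
      (match stB with
       | none => ((none, none) : Option Int × Option (List Int))
       | some bb => (some bb.2, some (hours bb.1)))).2
    = ((K.map (fun k => (k, tot k))).foldl
        (fun (b : Option (Int × Int)) (pr : Int × Int) =>
          match b with
          | none => some pr
          | some bb => if bb.2 < pr.2 then some pr else b)
        stB).map (fun bb => hours bb.1) := by
  induction K generalizing stB with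
  | nil => cases stB <;> simp
  | cons k t ih =>
      cases stB with
      | none => simpa [hsum] using ih (some (k, tot k))
      | some bb =>
          by_cases hlt : bb.2 < tot k
          · simpa [hsum, hlt] using ih (some (k, tot k))
          · simpa [hsum, hlt] using ih (some bb)

theorem ports_agree (sp pu : List Int) : find_peak_group sp pu = find_peak_group_alt sp pu := by
  unfold find_peak_group find_peak_group_alt
  simp only [stepA_eq_modify]
  set e := PySem.List.enumerate sp with he
  set g : Int × Int → Int := fun hp => PySem.List.pyGetD pu hp.1 0 with hg
  set hours : Int → List Int := fun c => (e.filter (fun hp => hp.2 == c)).map (·.1) with hhours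
  set tot : Int → Int := fun c => ((e.filter (fun hp => hp.2 == c)).map g).sum with htot
  set dA := e.foldl (fun d hp => d.modify hp.2 ([] : List Int) (fun hs => hs ++ [hp.1])) PySem.Dict.empty with hdA
  set dB := e.foldl (fun d hp => d.modify hp.2 (0:Int) (fun t => t + g hp)) PySem.Dict.empty with hdB
  have hAget : ∀ c, dA.getD c [] = hours c := by
    intro c
    have h1 : dA = (e.map (fun hp => (hp.2, hp.1))).foldl
        (fun d p => d.modify p.1 [] (fun hs => hs ++ [p.2])) PySem.Dict.empty := by
      rw [hdA, List.foldl_map]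
    rw [h1, PySem.Dict.getD_foldl_modify_append]
    simp [hhours, List.filter_map, Function.comp_def]
  have hBget : ∀ c, dB.getD c 0 = tot c := by
    intro c
    rw [hdB, getD_foldl_modify_add]
    simp [htot]
  have hsum : ∀ c, ((hours c).map (fun h => PySem.List.pyGetD pu h 0)).sum = tot c := by
    intro c
    simp [hhours, htot, List.map_map, hg, Function.comp_def]
  have hkA : dA.keys = PySem.Set.update [] (e.map (·.2)) := by
    rw [hdA]
    exact (PySem.Dict.keys_foldl_modify_key e (·.2) _ _ _).trans (by simp)
  have hkB : dB.keys = PySem.Set.update [] (e.map (·.2)) := by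
    rw [hdB]
    exact (PySem.Dict.keys_foldl_modify_key e (·.2) _ _ _).trans (by simp)
  have hndA : dA.keys.Nodup := by
    rw [hdA]
    exact PySem.Dict.nodup_keys_foldl_modify_key _ _ _ _ _ (by simp)
  have hndB : dB.keys.Nodup := by
    rw [hdB]
    exact PySem.Dict.nodup_keys_foldl_modify_key _ _ _ _ _ (by simp)
  have hiA : dA.items = dA.keys.map (fun k => (k, hours k)) := by
    rw [PySem.Dict.items_eq_map_keys dA hndA []]
    simp only [hAget]
  have hiB : dB.items = dB.keys.map (fun k => (k, tot k)) := by
    rw [PySem.Dict.items_eq_map_keys dB hndB 0]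
    simp only [hBget]
  rw [hiA, hiB, hkA, hkB]
  have hs := scan_agree hours tot pu hsum (PySem.Set.update [] (e.map (·.2))) none
  rw [show (match (none : Option (Int × Int)) with
       | none => ((none, none) : Option Int × Option (List Int))
       | some bb => (some bb.2, some (hours bb.1))) = ((none, none) : Option Int × Option (List Int)) from rfl] at hs
  rw [hs]
  cases ((PySem.Set.update [] (e.map (·.2))).map (fun k => (k, tot k))).foldl
      (fun (b : Option (Int × Int)) (pr : Int × Int) =>
        match b with
        | none => some pr
        | some bb => if bb.2 < pr.2 then some pr else b) none with
  | none => simp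
  | some bb => simp [hhours]

-- ===== VERDICT (by name: the statement is the Claim_ definition above) =====
theorem find_peak_group_spec : Claim_equal_find_peak_group := by
  intro sp pu _ _
  unfold Spec_find_peak_group
  exact ports_agree sp pu
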